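-- pv_equiv track=rewrite | github.com/alik-6/WitheredBot | libs/help.py | to_discord_str
-- ===== SOURCE A (Python) =====
-- def to_discord_str(s):
--     format_info = {
--         "[B]": "**",
--         "[I]": "*",
--         "[H]": "||",
--         "[C]": "```",
--         "[L]": "`",
--         "[Q/]": "> ",
--     }
--
--     for key, val in format_info.items():
--         if key in s:
--             s = s.replace(key, val)
--     sk = s
--     return sk
-- ===== SOURCE B (Python) =====
-- def to_discord_str(s):
--     table = {
--         "[B]": "**",
--         "[I]": "*",
--         "[H]": "||",
--         "[C]": "```",
--         "[L]": "`",
--         "[Q/]": "> ",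
--     }
--     out = []
--     i = 0
--     n = len(s)
--     while i < n:
--         for key, val in table.items():
--             if s.startswith(key, i):
--                 out.append(val)
--                 i += len(key)
--                 break
--         else:
--             out.append(s[i])
--             i += 1
--     return "".join(out)
-- ===== Notes on version B (the rewrite author's own statement) =====
-- stated objective: alternative
-- what changed: Replaces six sequential full-string .replace passes with a single left-to-right scan that matches each token against the table once and emits its replacement, joining the pieces at the end.
import Mathlib
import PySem

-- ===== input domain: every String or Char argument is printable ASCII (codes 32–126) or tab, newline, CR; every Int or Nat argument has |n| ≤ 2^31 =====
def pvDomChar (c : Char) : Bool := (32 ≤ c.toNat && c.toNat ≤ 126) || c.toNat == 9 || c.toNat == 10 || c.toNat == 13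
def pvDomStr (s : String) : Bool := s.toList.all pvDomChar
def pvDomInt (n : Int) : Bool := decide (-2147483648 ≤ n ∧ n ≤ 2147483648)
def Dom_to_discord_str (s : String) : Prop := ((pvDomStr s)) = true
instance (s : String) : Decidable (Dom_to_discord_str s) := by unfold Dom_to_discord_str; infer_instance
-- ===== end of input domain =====

-- B replaces A's six sequential full-string .replace passes by a single left-to-right
-- scan that matches each position against the token table once (objective: alternative).

-- ===== PORT A =====
-- the dict literal of A, as an association list in insertion order
def pvFormatInfo : List (String × String) :=
  [("[B]", "**"), ("[I]", "*"), ("[H]", "||"), ("[C]", "```"), ("[L]", "`"), ("[Q/]", "> ")]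

def to_discord_str (s : String) : String :=
  pvFormatInfo.foldl
    (fun s kv => if PySem.Str.isIn kv.1 s = true then PySem.Str.replace s kv.1 kv.2 else s) s

-- ===== PORT B =====
-- the same table, on the char-list side (Source B's dict, iterated at each position)
def pvTableB : List (List Char × List Char) :=
  [(['[','B',']'], ['*','*']),
   (['[','I',']'], ['*']),
   (['[','H',']'], ['|','|']),
   (['[','C',']'], ['`','`','`']),
   (['[','L',']'], ['`']),
   (['[','Q','/',']'], ['>',' '])]

-- Source B's while loop: at each position try the table keys in order; on a match emit the
-- value and skip past the key, otherwise emit the character and advance by one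
def pvScanB : List Char → List Char
  | [] => []
  | c :: t =>
    match pvTableB.find? (fun kv => kv.1.isPrefixOf (c :: t)) with
    | some kv => kv.2 ++ pvScanB (List.drop (kv.1.length - 1) t)
    | none => c :: pvScanB t
termination_by l => l.length
decreasing_by
  · simp only [List.length_cons, List.length_drop]; omega
  · simp

def to_discord_str_alt (s : String) : String := String.ofList (pvScanB s.toList)

-- ===== PRECONDITION & SPEC =====
def Spec_to_discord_str (s : String) (out : String) : Prop := out = to_discord_str_alt s
instance (s : String) (out : String) : Decidable (Spec_to_discord_str s out) := by unfold Spec_to_discord_str; infer_instance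

-- ===== CLAIM (what is proved, stated in full; the proofs are below) =====
def Claim_equal_to_discord_str : Prop := ∀ (s : String), Dom_to_discord_str s → Spec_to_discord_str s (to_discord_str s)

-- ===== LEMMAS AND PROOFS =====

-- leftmost nonoverlapping replace, structurally (proof-side model of PySem.Chars.replace)
def pvRep (old new : List Char) : List Char → List Char
  | [] => []
  | c :: t =>
    if old.isPrefixOf (c :: t) then new ++ pvRep old new (List.drop (old.length - 1) t)
    else c :: pvRep old new t
termination_by l => l.length
decreasing_by
  · simp only [List.length_cons, List.length_drop]; omega
  · simp

lemma pvRep_nil (o n : List Char) : pvRep o n [] = [] := by rw [pvRep]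

lemma pvRep_cons_pos (o n : List Char) (c : Char) (t : List Char)
    (h : o.isPrefixOf (c :: t) = true) :
    pvRep o n (c :: t) = n ++ pvRep o n (List.drop (o.length - 1) t) := by
  rw [pvRep, if_pos h]

lemma pvRep_cons_neg (o n : List Char) (c : Char) (t : List Char) (h : ¬ o <+: c :: t) :
    pvRep o n (c :: t) = c :: pvRep o n t := by
  rw [pvRep, if_neg (fun hb => h (List.isPrefixOf_iff_prefix.mp hb))]

lemma pvRep_tok (o n u : List Char) (ho : o ≠ []) : pvRep o n (o ++ u) = n ++ pvRep o n u := by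
  obtain ⟨c, o', rfl⟩ : ∃ c o', o = c :: o' := by
    cases o with
    | nil => exact absurd rfl ho
    | cons c o' => exact ⟨c, o', rfl⟩
  rw [List.cons_append,
      pvRep_cons_pos _ _ _ _ (List.isPrefixOf_iff_prefix.mpr ⟨u, by simp⟩)]
  simp

lemma pvRep_append_no_open (o n p u : List Char) (hk : o.head? = some '[') (hp : '[' ∉ p) :
    pvRep o n (p ++ u) = p ++ pvRep o n u := by
  induction p with
  | nil => simp
  | cons c p' ih =>
    have hc : c ≠ '[' := fun h => hp (by simp [h])
    have hnp : ¬ o <+: c :: (p' ++ u) := by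
      intro hpre
      cases o with
      | nil => simp at hk
      | cons a o' =>
        have := (List.cons_prefix_cons.mp hpre).1
        simp at hk
        exact hc (by rw [← this, hk])
    rw [List.cons_append, pvRep_cons_neg _ _ _ _ hnp, ih (fun h => hp (by simp [h]))]
    simp

lemma pvRep_not_infix (o n l : List Char) (h : ¬ o <:+: l) : pvRep o n l = l := by
  induction l with
  | nil => exact pvRep_nil o n
  | cons c t ih =>
    have h1 : ¬ o <+: c :: t := fun hp => h hp.isInfix
    have h2 : ¬ o <:+: t := fun hi => h (List.infix_cons hi)
    rw [pvRep_cons_neg _ _ _ _ h1, ih h2]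

-- PySem.Chars.replace (with a nonempty pattern) computes pvRep
lemma go_eq_pvRep (old new : List Char) (ho : old ≠ []) :
    ∀ (fuel : Nat) (l acc : List Char), l.length ≤ fuel →
      PySem.Chars.replace.go old new fuel l acc = acc.reverse ++ pvRep old new l := by
  intro fuel
  induction fuel with
  | zero =>
    intro l acc hl
    have hnil : l = [] := by cases l with | nil => rfl | cons _ _ => simp at hl
    subst hnil
    show acc.reverse ++ [] = acc.reverse ++ pvRep old new []
    rw [pvRep_nil]
  | succ n ih =>
    intro l acc hl
    cases l with
    | nil =>
      show acc.reverse = acc.reverse ++ pvRep old new []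
      rw [pvRep_nil, List.append_nil]
    | cons c t =>
      have hstep : PySem.Chars.replace.go old new (n+1) (c :: t) acc =
          if old.isPrefixOf (c :: t) then
            PySem.Chars.replace.go old new n (List.drop old.length (c :: t)) (new.reverse ++ acc)
          else PySem.Chars.replace.go old new n t (c :: acc) := rfl
      rw [hstep]
      have hol : 1 ≤ old.length := by
        cases old with
        | nil => exact absurd rfl ho
        | cons _ _ => simp
      by_cases hp : old.isPrefixOf (c :: t) = true
      · rw [if_pos hp]
        have hlen : (List.drop old.length (c :: t)).length ≤ n := by
          simp only [List.length_drop, List.length_cons] at *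
          omega
        rw [ih _ _ hlen, pvRep_cons_pos _ _ _ _ hp]
        have hdrop : List.drop old.length (c :: t) = List.drop (old.length - 1) t := by
          cases old with
          | nil => exact absurd rfl ho
          | cons a o' => simp
        rw [hdrop]
        simp
      · rw [if_neg hp, ih t (c :: acc) (by simp at hl; omega),
            pvRep_cons_neg _ _ _ _ (fun h => hp (List.isPrefixOf_iff_prefix.mpr h))]
        simp
lemma replace_eq_pvRep (s old new : List Char) (ho : old ≠ []) :
    PySem.Chars.replace s old new = pvRep old new s := by
  rw [PySem.Chars.replace]
  have hne : old.isEmpty = false := by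
    cases old with | nil => exact absurd rfl ho | cons _ _ => rfl
  rw [hne]
  simp only [Bool.false_eq_true, if_false]
  exact go_eq_pvRep old new ho s.length s [] (le_refl _)

-- one pass of A, on the char-list side
lemma step_toList (k v : String) (hk : k.toList ≠ []) (s : String) :
    (if PySem.Str.isIn k s = true then PySem.Str.replace s k v else s).toList
      = pvRep k.toList v.toList s.toList := by
  split
  · rw [PySem.Str.toList_replace, replace_eq_pvRep _ _ _ hk]
  · next h =>
    have hni : ¬ k.toList <:+: s.toList := fun hin => h ((PySem.Str.isIn_iff_infix k s).mpr hin)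
    exact (pvRep_not_infix _ _ _ hni).symm

-- the whole of A, on the char-list side
def pvApplyA (l : List Char) : List Char :=
  pvTableB.foldl (fun l kv => pvRep kv.1 kv.2 l) l

lemma toList_to_discord (s : String) : (to_discord_str s).toList = pvApplyA s.toList := by
  unfold to_discord_str pvFormatInfo pvApplyA pvTableB
  simp only [List.foldl]
  rw [step_toList _ _ (by decide), step_toList _ _ (by decide), step_toList _ _ (by decide),
      step_toList _ _ (by decide), step_toList _ _ (by decide), step_toList _ _ (by decide)]
  rfl

-- a prefix whose characters do not occur in the replacement value reflects backwards
-- through one replace pass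
lemma pvRep_prefix_reflect (k v : List Char) (hv : v ≠ []) :
    ∀ t w, (∀ ch ∈ v, ch ∉ w) → w <+: pvRep k v t → w <+: t := by
  intro t
  induction t using pvRep.induct (old := k) with
  | case1 => intro w _; rw [pvRep_nil]; exact fun h => h
  | case2 c t hp ih =>
    intro w hd
    rw [pvRep_cons_pos _ _ _ _ hp]
    intro hw
    cases w with
    | nil => exact List.nil_prefix
    | cons a w' =>
      exfalso
      cases v with
      | nil => exact absurd rfl hv
      | cons b v' =>
        have hab : a = b := (List.cons_prefix_cons.mp (by simpa using hw)).1
        exact hd b (by simp) (by simp [← hab])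
  | case3 c t hp ih =>
    intro w hd
    rw [pvRep_cons_neg _ _ _ _ (fun h => hp (List.isPrefixOf_iff_prefix.mpr h))]
    intro hw
    cases w with
    | nil => exact List.nil_prefix
    | cons a w' =>
      obtain ⟨ha, hw'⟩ := List.cons_prefix_cons.mp hw
      exact List.cons_prefix_cons.mpr
        ⟨ha, ih w' (fun ch hch hmem => hd ch hch (List.mem_cons_of_mem a hmem)) hw'⟩

-- "no token here" survives one pass of the composition
lemma lift_not_prefix (tl t X : List Char) (c : Char) (hrefl : tl <+: X → tl <+: t)
    (h : ¬ ('[' :: tl) <+: c :: t) : ¬ ('[' :: tl) <+: c :: X := by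
  intro hp
  obtain ⟨hc, htl⟩ := List.cons_prefix_cons.mp hp
  exact h (List.cons_prefix_cons.mpr ⟨hc, hrefl htl⟩)

-- a token with a different second character is never a prefix of Kj ++ u
lemma not_prefix_of_snd_ne (a b c d : Char) (k' r : List Char) (h : b ≠ d) :
    ¬ (a :: b :: k') <+: (c :: d :: r) := by
  intro hp
  obtain ⟨_, hp'⟩ := List.cons_prefix_cons.mp hp
  exact h (List.cons_prefix_cons.mp hp').1

-- a non-matching pass steps over a token at the head of the string
lemma pvRep_skip (o n : List Char) (x : Char) (ktl u : List Char)
    (hnp : ¬ o <+: ('[' :: x :: ktl) ++ u) (ho : o.head? = some '[') (hk : '[' ∉ x :: ktl) :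
    pvRep o n (('[' :: x :: ktl) ++ u) = ('[' :: x :: ktl) ++ pvRep o n u := by
  rw [List.cons_append]
  rw [pvRep_cons_neg _ _ _ _ (by simpa using hnp)]
  rw [pvRep_append_no_open o n (x :: ktl) u ho hk]
  simp

-- the six token-at-head steps of the composed A
lemma applyA_tok1 (u : List Char) : pvApplyA (['[','B',']'] ++ u) = ['*','*'] ++ pvApplyA u := by
  unfold pvApplyA pvTableB
  simp only [List.foldl]
  rw [pvRep_tok _ _ _ (by decide)]
  rw [pvRep_append_no_open _ _ ['*','*'] _ rfl (by decide),
      pvRep_append_no_open _ _ ['*','*'] _ rfl (by decide),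
      pvRep_append_no_open _ _ ['*','*'] _ rfl (by decide),
      pvRep_append_no_open _ _ ['*','*'] _ rfl (by decide),
      pvRep_append_no_open _ _ ['*','*'] _ rfl (by decide)]

lemma applyA_tok2 (u : List Char) : pvApplyA (['[','I',']'] ++ u) = ['*'] ++ pvApplyA u := by
  unfold pvApplyA pvTableB
  simp only [List.foldl]
  rw [pvRep_skip _ _ _ _ _ (not_prefix_of_snd_ne _ _ _ _ _ _ (by decide)) rfl (by decide),
      pvRep_tok _ _ _ (by decide)]
  rw [pvRep_append_no_open _ _ ['*'] _ rfl (by decide),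
      pvRep_append_no_open _ _ ['*'] _ rfl (by decide),
      pvRep_append_no_open _ _ ['*'] _ rfl (by decide),
      pvRep_append_no_open _ _ ['*'] _ rfl (by decide)]

lemma applyA_tok3 (u : List Char) : pvApplyA (['[','H',']'] ++ u) = ['|','|'] ++ pvApplyA u := by
  unfold pvApplyA pvTableB
  simp only [List.foldl]
  rw [pvRep_skip _ _ _ _ _ (not_prefix_of_snd_ne _ _ _ _ _ _ (by decide)) rfl (by decide),
      pvRep_skip _ _ _ _ _ (not_prefix_of_snd_ne _ _ _ _ _ _ (by decide)) rfl (by decide),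
      pvRep_tok _ _ _ (by decide)]
  rw [pvRep_append_no_open _ _ ['|','|'] _ rfl (by decide),
      pvRep_append_no_open _ _ ['|','|'] _ rfl (by decide),
      pvRep_append_no_open _ _ ['|','|'] _ rfl (by decide)]

lemma applyA_tok4 (u : List Char) : pvApplyA (['[','C',']'] ++ u) = ['`','`','`'] ++ pvApplyA u := by
  unfold pvApplyA pvTableB
  simp only [List.foldl]
  rw [pvRep_skip _ _ _ _ _ (not_prefix_of_snd_ne _ _ _ _ _ _ (by decide)) rfl (by decide),
      pvRep_skip _ _ _ _ _ (not_prefix_of_snd_ne _ _ _ _ _ _ (by decide)) rfl (by decide),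
      pvRep_skip _ _ _ _ _ (not_prefix_of_snd_ne _ _ _ _ _ _ (by decide)) rfl (by decide),
      pvRep_tok _ _ _ (by decide)]
  rw [pvRep_append_no_open _ _ ['`','`','`'] _ rfl (by decide),
      pvRep_append_no_open _ _ ['`','`','`'] _ rfl (by decide)]

lemma applyA_tok5 (u : List Char) : pvApplyA (['[','L',']'] ++ u) = ['`'] ++ pvApplyA u := by
  unfold pvApplyA pvTableB
  simp only [List.foldl]
  rw [pvRep_skip _ _ _ _ _ (not_prefix_of_snd_ne _ _ _ _ _ _ (by decide)) rfl (by decide),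
      pvRep_skip _ _ _ _ _ (not_prefix_of_snd_ne _ _ _ _ _ _ (by decide)) rfl (by decide),
      pvRep_skip _ _ _ _ _ (not_prefix_of_snd_ne _ _ _ _ _ _ (by decide)) rfl (by decide),
      pvRep_skip _ _ _ _ _ (not_prefix_of_snd_ne _ _ _ _ _ _ (by decide)) rfl (by decide),
      pvRep_tok _ _ _ (by decide)]
  rw [pvRep_append_no_open _ _ ['`'] _ rfl (by decide)]

lemma applyA_tok6 (u : List Char) : pvApplyA (['[','Q','/',']'] ++ u) = ['>',' '] ++ pvApplyA u := by
  unfold pvApplyA pvTableB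
  simp only [List.foldl]
  rw [pvRep_skip _ _ _ _ _ (not_prefix_of_snd_ne _ _ _ _ _ _ (by decide)) rfl (by decide),
      pvRep_skip _ _ _ _ _ (not_prefix_of_snd_ne _ _ _ _ _ _ (by decide)) rfl (by decide),
      pvRep_skip _ _ _ _ _ (not_prefix_of_snd_ne _ _ _ _ _ _ (by decide)) rfl (by decide),
      pvRep_skip _ _ _ _ _ (not_prefix_of_snd_ne _ _ _ _ _ _ (by decide)) rfl (by decide),
      pvRep_skip _ _ _ _ _ (not_prefix_of_snd_ne _ _ _ _ _ _ (by decide)) rfl (by decide),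
      pvRep_tok _ _ _ (by decide)]

-- no token at the head: every pass keeps the head character
lemma applyA_cons_neg (c : Char) (t : List Char)
    (h1 : ¬ ['[','B',']'] <+: c :: t) (h2 : ¬ ['[','I',']'] <+: c :: t)
    (h3 : ¬ ['[','H',']'] <+: c :: t) (h4 : ¬ ['[','C',']'] <+: c :: t)
    (h5 : ¬ ['[','L',']'] <+: c :: t) (h6 : ¬ ['[','Q','/',']'] <+: c :: t) :
    pvApplyA (c :: t) = c :: pvApplyA t := by
  unfold pvApplyA pvTableB
  simp only [List.foldl]
  have r1 : ∀ w : List Char, (∀ ch ∈ (['*','*'] : List Char), ch ∉ w) →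
      (w <+: pvRep ['[','B',']'] ['*','*'] t → w <+: t) :=
    fun w hd => pvRep_prefix_reflect _ _ (by decide) t w hd
  have r2 : ∀ w : List Char, (∀ ch ∈ (['*'] : List Char), ch ∉ w) →
      (w <+: pvRep ['[','I',']'] ['*'] (pvRep ['[','B',']'] ['*','*'] t) →
        w <+: pvRep ['[','B',']'] ['*','*'] t) :=
    fun w hd => pvRep_prefix_reflect _ _ (by decide) _ w hd
  have r3 : ∀ w : List Char, (∀ ch ∈ (['|','|'] : List Char), ch ∉ w) →
      (w <+: pvRep ['[','H',']'] ['|','|'] (pvRep ['[','I',']'] ['*'] (pvRep ['[','B',']'] ['*','*'] t)) →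
        w <+: pvRep ['[','I',']'] ['*'] (pvRep ['[','B',']'] ['*','*'] t)) :=
    fun w hd => pvRep_prefix_reflect _ _ (by decide) _ w hd
  have r4 : ∀ w : List Char, (∀ ch ∈ (['`','`','`'] : List Char), ch ∉ w) →
      (w <+: pvRep ['[','C',']'] ['`','`','`'] (pvRep ['[','H',']'] ['|','|'] (pvRep ['[','I',']'] ['*'] (pvRep ['[','B',']'] ['*','*'] t))) →
        w <+: pvRep ['[','H',']'] ['|','|'] (pvRep ['[','I',']'] ['*'] (pvRep ['[','B',']'] ['*','*'] t))) :=
    fun w hd => pvRep_prefix_reflect _ _ (by decide) _ w hd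
  have r5 : ∀ w : List Char, (∀ ch ∈ (['`'] : List Char), ch ∉ w) →
      (w <+: pvRep ['[','L',']'] ['`'] (pvRep ['[','C',']'] ['`','`','`'] (pvRep ['[','H',']'] ['|','|'] (pvRep ['[','I',']'] ['*'] (pvRep ['[','B',']'] ['*','*'] t)))) →
        w <+: pvRep ['[','C',']'] ['`','`','`'] (pvRep ['[','H',']'] ['|','|'] (pvRep ['[','I',']'] ['*'] (pvRep ['[','B',']'] ['*','*'] t)))) :=
    fun w hd => pvRep_prefix_reflect _ _ (by decide) _ w hd
  rw [pvRep_cons_neg _ _ _ _ h1]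
  have h2' := lift_not_prefix ['I',']'] t _ c (r1 ['I',']'] (by simp)) h2
  rw [pvRep_cons_neg _ _ _ _ h2']
  have h3' := lift_not_prefix ['H',']'] t _ c
    (fun hp => r1 ['H',']'] (by simp) (r2 ['H',']'] (by simp) hp)) h3
  rw [pvRep_cons_neg _ _ _ _ h3']
  have h4' := lift_not_prefix ['C',']'] t _ c
    (fun hp => r1 ['C',']'] (by simp) (r2 ['C',']'] (by simp) (r3 ['C',']'] (by simp) hp))) h4
  rw [pvRep_cons_neg _ _ _ _ h4']
  have h5' := lift_not_prefix ['L',']'] t _ c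
    (fun hp => r1 ['L',']'] (by simp) (r2 ['L',']'] (by simp) (r3 ['L',']'] (by simp)
      (r4 ['L',']'] (by simp) hp)))) h5
  rw [pvRep_cons_neg _ _ _ _ h5']
  have h6' := lift_not_prefix ['Q','/',']'] t _ c
    (fun hp => r1 ['Q','/',']'] (by simp) (r2 ['Q','/',']'] (by simp) (r3 ['Q','/',']'] (by simp)
      (r4 ['Q','/',']'] (by simp) (r5 ['Q','/',']'] (by simp) hp))))) h6
  rw [pvRep_cons_neg _ _ _ _ h6']

-- scanner equations
lemma scanB_nil : pvScanB [] = [] := by rw [pvScanB.eq_def]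

lemma scanB_tok1 (u : List Char) : pvScanB (['[','B',']'] ++ u) = ['*','*'] ++ pvScanB u := by
  rw [pvScanB.eq_def]
  have hfind : pvTableB.find? (fun kv => kv.1.isPrefixOf ('[' :: 'B' :: ']' :: u)) = some (['[','B',']'], ['*','*']) := by
    simp [pvTableB, List.isPrefixOf]
  simp only [List.cons_append, List.nil_append, hfind]
  simp

lemma scanB_tok2 (u : List Char) : pvScanB (['[','I',']'] ++ u) = ['*'] ++ pvScanB u := by
  rw [pvScanB.eq_def]
  have hfind : pvTableB.find? (fun kv => kv.1.isPrefixOf ('[' :: 'I' :: ']' :: u)) = some (['[','I',']'], ['*']) := by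
    simp [pvTableB, List.find?, List.isPrefixOf]
  simp only [List.cons_append, List.nil_append, hfind]
  simp

lemma scanB_tok3 (u : List Char) : pvScanB (['[','H',']'] ++ u) = ['|','|'] ++ pvScanB u := by
  rw [pvScanB.eq_def]
  have hfind : pvTableB.find? (fun kv => kv.1.isPrefixOf ('[' :: 'H' :: ']' :: u)) = some (['[','H',']'], ['|','|']) := by
    simp [pvTableB, List.find?, List.isPrefixOf]
  simp only [List.cons_append, List.nil_append, hfind]
  simp

lemma scanB_tok4 (u : List Char) : pvScanB (['[','C',']'] ++ u) = ['`','`','`'] ++ pvScanB u := by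
  rw [pvScanB.eq_def]
  have hfind : pvTableB.find? (fun kv => kv.1.isPrefixOf ('[' :: 'C' :: ']' :: u)) = some (['[','C',']'], ['`','`','`']) := by
    simp [pvTableB, List.find?, List.isPrefixOf]
  simp only [List.cons_append, List.nil_append, hfind]
  simp

lemma scanB_tok5 (u : List Char) : pvScanB (['[','L',']'] ++ u) = ['`'] ++ pvScanB u := by
  rw [pvScanB.eq_def]
  have hfind : pvTableB.find? (fun kv => kv.1.isPrefixOf ('[' :: 'L' :: ']' :: u)) = some (['[','L',']'], ['`']) := by
    simp [pvTableB, List.find?, List.isPrefixOf]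
  simp only [List.cons_append, List.nil_append, hfind]
  simp

lemma scanB_tok6 (u : List Char) : pvScanB (['[','Q','/',']'] ++ u) = ['>',' '] ++ pvScanB u := by
  rw [pvScanB.eq_def]
  have hfind : pvTableB.find? (fun kv => kv.1.isPrefixOf ('[' :: 'Q' :: '/' :: ']' :: u)) = some (['[','Q','/',']'], ['>',' ']) := by
    simp [pvTableB, List.find?, List.isPrefixOf]
  simp only [List.cons_append, List.nil_append, hfind]
  simp

lemma scanB_cons_neg (c : Char) (t : List Char)
    (h1 : ¬ ['[','B',']'] <+: c :: t) (h2 : ¬ ['[','I',']'] <+: c :: t)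
    (h3 : ¬ ['[','H',']'] <+: c :: t) (h4 : ¬ ['[','C',']'] <+: c :: t)
    (h5 : ¬ ['[','L',']'] <+: c :: t) (h6 : ¬ ['[','Q','/',']'] <+: c :: t) :
    pvScanB (c :: t) = c :: pvScanB t := by
  have b1 : (['[','B',']'] : List Char).isPrefixOf (c :: t) = false :=
    Bool.eq_false_iff.mpr (fun hb => h1 (List.isPrefixOf_iff_prefix.mp hb))
  have b2 : (['[','I',']'] : List Char).isPrefixOf (c :: t) = false :=
    Bool.eq_false_iff.mpr (fun hb => h2 (List.isPrefixOf_iff_prefix.mp hb))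
  have b3 : (['[','H',']'] : List Char).isPrefixOf (c :: t) = false :=
    Bool.eq_false_iff.mpr (fun hb => h3 (List.isPrefixOf_iff_prefix.mp hb))
  have b4 : (['[','C',']'] : List Char).isPrefixOf (c :: t) = false :=
    Bool.eq_false_iff.mpr (fun hb => h4 (List.isPrefixOf_iff_prefix.mp hb))
  have b5 : (['[','L',']'] : List Char).isPrefixOf (c :: t) = false :=
    Bool.eq_false_iff.mpr (fun hb => h5 (List.isPrefixOf_iff_prefix.mp hb))
  have b6 : (['[','Q','/',']'] : List Char).isPrefixOf (c :: t) = false :=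
    Bool.eq_false_iff.mpr (fun hb => h6 (List.isPrefixOf_iff_prefix.mp hb))
  rw [pvScanB.eq_def]
  have hfind : pvTableB.find? (fun kv => kv.1.isPrefixOf (c :: t)) = none := by
    simp [pvTableB, List.find?, b1, b2, b3, b4, b5, b6]
  simp only [hfind]

-- the main equivalence, by strong induction on the length
lemma pv_main : ∀ (n : Nat) (l : List Char), l.length ≤ n → pvApplyA l = pvScanB l := by
  intro n
  induction n with
  | zero =>
    intro l hl
    have hnil : l = [] := by cases l with | nil => rfl | cons _ _ => simp at hl
    subst hnil
    rw [scanB_nil]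
    unfold pvApplyA pvTableB
    simp only [List.foldl, pvRep_nil]
  | succ n ih =>
    intro l hl
    cases l with
    | nil =>
      rw [scanB_nil]
      unfold pvApplyA pvTableB
      simp only [List.foldl, pvRep_nil]
    | cons c t =>
      simp only [List.length_cons] at hl
      by_cases g1 : (['[','B',']'] : List Char) <+: c :: t
      · obtain ⟨u, hu⟩ := g1
        have hlu : u.length ≤ n := by
          have := congrArg List.length hu
          simp at this
          omega
        rw [← hu, applyA_tok1, scanB_tok1, ih u hlu]
      by_cases g2 : (['[','I',']'] : List Char) <+: c :: t
      · obtain ⟨u, hu⟩ := g2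
        have hlu : u.length ≤ n := by
          have := congrArg List.length hu
          simp at this
          omega
        rw [← hu, applyA_tok2, scanB_tok2, ih u hlu]
      by_cases g3 : (['[','H',']'] : List Char) <+: c :: t
      · obtain ⟨u, hu⟩ := g3
        have hlu : u.length ≤ n := by
          have := congrArg List.length hu
          simp at this
          omega
        rw [← hu, applyA_tok3, scanB_tok3, ih u hlu]
      by_cases g4 : (['[','C',']'] : List Char) <+: c :: t
      · obtain ⟨u, hu⟩ := g4
        have hlu : u.length ≤ n := by
          have := congrArg List.length hu
          simp at this
          omega
        rw [← hu, applyA_tok4, scanB_tok4, ih u hlu]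
      by_cases g5 : (['[','L',']'] : List Char) <+: c :: t
      · obtain ⟨u, hu⟩ := g5
        have hlu : u.length ≤ n := by
          have := congrArg List.length hu
          simp at this
          omega
        rw [← hu, applyA_tok5, scanB_tok5, ih u hlu]
      by_cases g6 : (['[','Q','/',']'] : List Char) <+: c :: t
      · obtain ⟨u, hu⟩ := g6
        have hlu : u.length ≤ n := by
          have := congrArg List.length hu
          simp at this
          omega
        rw [← hu, applyA_tok6, scanB_tok6, ih u hlu]
      rw [applyA_cons_neg c t g1 g2 g3 g4 g5 g6, scanB_cons_neg c t g1 g2 g3 g4 g5 g6,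
          ih t (by omega)]

-- ===== VERDICT (by name: the statement is the Claim_ definition above) =====
theorem to_discord_str_spec : Claim_equal_to_discord_str := by
  intro s _
  show to_discord_str s = to_discord_str_alt s
  have h : (to_discord_str s).toList = (to_discord_str_alt s).toList := by
    rw [toList_to_discord]
    unfold to_discord_str_alt
    simp only [String.toList_ofList]
    exact pv_main s.toList.length s.toList (le_refl _)
  calc to_discord_str s = String.ofList (to_discord_str s).toList := by simp
    _ = String.ofList (to_discord_str_alt s).toList := by rw [h]
    _ = to_discord_str_alt s := by simp
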